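-- pv_equiv track=rewrite | github.com/zzxxj216/card-pack-agent | src/card_pack_agent/tools/evaluator.py | _consecutive_runs
-- ===== SOURCE A (Python) =====
-- def _consecutive_runs(positions: list[int]) -> list[list[int]]:
--     if not positions:
--         return []
--     positions = sorted(set(positions))
--     runs, cur = [], [positions[0]]
--     for p in positions[1:]:
--         if p == cur[-1] + 1:
--             cur.append(p)
--         else:
--             runs.append(cur)
--             cur = [p]
--     runs.append(cur)
--     return runs
-- ===== SOURCE B (Python) =====
-- def _consecutive_runs(positions: list[int]) -> list[list[int]]:
--     # boundary detection: a run starts at v when v-1 is absent, ends at v when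
--     # v+1 is absent; the k-th start pairs with the k-th end, and the run's
--     # contents are reconstructed with range
--     s = set(positions)
--     u = sorted(s)
--     starts = [v for v in u if v - 1 not in s]
--     ends = [v for v in u if v + 1 not in s]
--     return [list(range(a, b + 1)) for a, b in zip(starts, ends)]
-- ===== Notes on version B (the rewrite author's own statement) =====
-- stated objective: alternative
-- what changed: Replaces the forward loop with a running accumulator and neighbour comparison by boundary detection: run starts (v-1 absent from the set) are zipped with run ends (v+1 absent) and each run's contents are rebuilt with range.
import Mathlib
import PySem

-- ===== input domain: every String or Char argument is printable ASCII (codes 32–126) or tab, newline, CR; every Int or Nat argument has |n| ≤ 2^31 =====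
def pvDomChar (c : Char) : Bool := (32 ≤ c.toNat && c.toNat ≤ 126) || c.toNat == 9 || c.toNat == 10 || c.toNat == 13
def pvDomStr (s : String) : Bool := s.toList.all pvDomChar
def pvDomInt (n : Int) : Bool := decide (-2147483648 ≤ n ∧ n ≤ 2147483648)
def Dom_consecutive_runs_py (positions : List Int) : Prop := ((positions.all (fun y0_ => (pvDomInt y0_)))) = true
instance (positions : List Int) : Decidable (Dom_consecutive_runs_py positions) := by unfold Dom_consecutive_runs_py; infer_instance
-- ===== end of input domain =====

-- B replaces A's forward accumulator loop by boundary detection (zip run starts with run ends, rebuild each run with range); objective: alternative.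


-- ===== PORT A =====
-- the 'for p in positions[1:]' loop, carrying (runs, cur); 'runs.append(cur)' after the loop
def aLoop (rest : List Int) (runs : List (List Int)) (cur : List Int) : List (List Int) :=
  match rest with
  | [] => runs ++ [cur]
  | p :: rest' =>
    if p = (PySem.List.pyGet? cur (-1)).getD 0 + 1 then aLoop rest' runs (cur ++ [p])
    else aLoop rest' (runs ++ [cur]) [p]

def consecutive_runs_py (positions : List Int) : List (List Int) :=
  if positions = [] then []
  else
    match PySem.List.sorted (PySem.Set.ofList positions) (fun x => x) false with
    | [] => []  -- unreachable: sorted(set(positions)) is nonempty here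
    | h :: t => aLoop t [] [h]

-- ===== PORT B =====
-- Source B: s = set(positions); u = sorted(s); starts/ends comprehensions; zip + range
def consecutive_runs_py_alt (positions : List Int) : List (List Int) :=
  let s := PySem.Set.ofList positions
  let u := PySem.List.sorted s (fun x => x) false
  let starts := u.filter (fun v => !(PySem.Set.contains s (v - 1)))
  let ends := u.filter (fun v => !(PySem.Set.contains s (v + 1)))
  (starts.zip ends).map (fun ab => PySem.List.pyRange ab.1 (ab.2 + 1) 1)

-- ===== PRECONDITION & SPEC =====
def Spec_consecutive_runs_py (positions : List Int) (out : List (List Int)) : Prop := out = consecutive_runs_py_alt positions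
instance (positions : List Int) (out : List (List Int)) : Decidable (Spec_consecutive_runs_py positions out) := by unfold Spec_consecutive_runs_py; infer_instance

-- ===== CLAIM (what is proved, stated in full; the proofs are below) =====
def Claim_equal_consecutive_runs_py : Prop := ∀ (positions : List Int), Dom_consecutive_runs_py positions → Spec_consecutive_runs_py positions (consecutive_runs_py positions)

-- ===== LEMMAS AND PROOFS =====

-- bridge function between the two ports: recursive back-to-front run construction
def bBuild : List Int → List (List Int)
  | [] => []
  | p :: xs =>
    match bBuild xs with
    | (q :: r) :: rest => if q = p + 1 then (p :: q :: r) :: rest else [p] :: (q :: r) :: rest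
    | rest => [p] :: rest

-- one unfolding step of bBuild
theorem bBuild_cons (p : Int) (xs : List Int) :
    bBuild (p :: xs) = (match bBuild xs with
      | (q :: r) :: rest => if q = p + 1 then (p :: q :: r) :: rest else [p] :: (q :: r) :: rest
      | rest => [p] :: rest) := rfl

-- bBuild step with the tail's result known
theorem bBuild_cons_eq (p : Int) (xs : List Int) (q : Int) (r : List Int) (rest : List (List Int))
    (hxs : bBuild xs = (q :: r) :: rest) :
    bBuild (p :: xs) = if q = p + 1 then (p :: q :: r) :: rest else [p] :: (q :: r) :: rest := by
  rw [bBuild_cons, hxs]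

-- bBuild on a nonempty list starts its first run with the head
theorem bBuild_head (p : Int) (xs : List Int) :
    ∃ r rs, bBuild (p :: xs) = (p :: r) :: rs := by
  rw [bBuild_cons]
  rcases bBuild xs with _ | ⟨_ | ⟨q, r⟩, rest⟩
  · exact ⟨[], [], rfl⟩
  · exact ⟨[], [] :: rest, rfl⟩
  · by_cases hq : q = p + 1
    · exact ⟨q :: r, rest, by simp [hq]⟩
    · exact ⟨[], (q :: r) :: rest, by simp [hq]⟩

-- ===== A-side: the accumulator loop equals bBuild =====

-- accumulator lemma: the runs built so far are just prepended to the final result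
theorem aLoop_acc (rest : List Int) (runs : List (List Int)) (cur : List Int) :
    aLoop rest runs cur = runs ++ aLoop rest [] cur := by
  induction rest generalizing runs cur with
  | nil => simp [aLoop]
  | cons p rest' ih =>
    simp only [aLoop, List.nil_append]
    split_ifs
    · exact ih runs (cur ++ [p])
    · rw [ih (runs ++ [cur]) [p], ih [cur] [p]]; simp

def prependFirst (c : List Int) : List (List Int) → List (List Int)
  | [] => []
  | r :: rs => (c ++ r) :: rs

theorem pyGet_neg1_append (c : List Int) (d : Int) (cs : List Int) :
    PySem.List.pyGet? (c ++ d :: cs) (-1) = PySem.List.pyGet? (d :: cs) (-1) := by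
  simp [PySem.List.pyGet?, PySem.List.pyIdx?]
  omega

-- a nonempty prefix of 'cur' is only ever glued onto the first run produced
theorem aLoop_prefix (rest : List Int) (c : List Int) (d : Int) (cs : List Int) :
    aLoop rest [] (c ++ d :: cs) = prependFirst c (aLoop rest [] (d :: cs)) := by
  induction rest generalizing c d cs with
  | nil => simp [aLoop, prependFirst]
  | cons p rest' ih =>
    simp only [aLoop, pyGet_neg1_append, List.nil_append]
    split_ifs
    · have h1 : (c ++ d :: cs) ++ [p] = c ++ (d :: (cs ++ [p])) := by simp
      have h2 : (d :: cs) ++ [p] = d :: (cs ++ [p]) := by simp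
      rw [h1, h2, ih]
    · rw [aLoop_acc rest' [c ++ d :: cs] [p], aLoop_acc rest' [d :: cs] [p]]
      simp [prependFirst]

theorem aLoop_eq_bBuild (t : List Int) (h : Int) :
    aLoop t [] [h] = bBuild (h :: t) := by
  induction t generalizing h with
  | nil => simp [aLoop, bBuild]
  | cons p t' ih =>
    obtain ⟨r, rs, hb⟩ := bBuild_head p t'
    have key : (PySem.List.pyGet? [h] (-1)).getD 0 = h := by
      simp [PySem.List.pyGet?, PySem.List.pyIdx?]
    simp only [aLoop, key, List.nil_append]
    by_cases hc : p = h + 1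
    · simp only [if_pos hc]
      rw [show ([h] : List Int) ++ [p] = [h] ++ (p :: ([] : List Int)) from rfl,
        aLoop_prefix t' [h] p [], ih p, bBuild_cons h (p :: t'), hb]
      simp [prependFirst, hc]
    · simp only [if_neg hc]
      rw [aLoop_acc t' [[h]] [p], ih p, bBuild_cons h (p :: t'), hb]
      simp [hc]

-- ===== B-side: boundary detection equals bBuild on strictly increasing lists =====

-- B's computation with set membership re-expressed as membership in the sorted list itself
def runsOf (u : List Int) : List (List Int) :=
  ((u.filter (fun v => !(decide ((v - 1) ∈ u)))).zip (u.filter (fun v => !(decide ((v + 1) ∈ u))))).map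
    (fun ab => PySem.List.pyRange ab.1 (ab.2 + 1) 1)

theorem runsOf_eq_bBuild (u : List Int) (hp : u.Pairwise (· < ·)) : runsOf u = bBuild u := by
  induction u with
  | nil => rfl
  | cons h t ih =>
    cases t with
    | nil =>
      have h1 : ¬ ((h - 1 : Int) = h) := by omega
      have h2 : ¬ ((h + 1 : Int) = h) := by omega
      simp [runsOf, bBuild, h1, h2, PySem.List.pyRange_one_singleton]
    | cons p t' =>
      obtain ⟨hh, hp'⟩ := List.pairwise_cons.1 hp
      obtain ⟨hpall, _⟩ := List.pairwise_cons.1 hp'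
      have hhp : h < p := hh p List.mem_cons_self
      have ihv := ih hp'
      -- membership facts
      have hsh : ¬ ((h - 1) ∈ h :: p :: t') := by
        intro hm
        rcases List.mem_cons.1 hm with e | hm
        · omega
        · have := hh _ hm; omega
      have hft' : ∀ v ∈ t', (!(decide ((v - 1) ∈ h :: p :: t'))) = (!(decide ((v - 1) ∈ p :: t'))) := by
        intro v hv
        have hpv := hpall v hv
        have : ((v - 1) ∈ h :: p :: t') ↔ ((v - 1) ∈ p :: t') := by
          simp only [List.mem_cons]
          constructor
          · rintro (e | m)
            · omega
            · exact m
          · intro m; exact Or.inr m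
        simp [this]
      have hgt' : ∀ v ∈ t', (!(decide ((v + 1) ∈ h :: p :: t'))) = (!(decide ((v + 1) ∈ p :: t'))) := by
        intro v hv
        have hpv := hpall v hv
        have : ((v + 1) ∈ h :: p :: t') ↔ ((v + 1) ∈ p :: t') := by
          simp only [List.mem_cons]
          constructor
          · rintro (e | m)
            · omega
            · exact m
          · intro m; exact Or.inr m
        simp [this]
      have hpe : (!(decide ((p + 1) ∈ h :: p :: t'))) = (!(decide ((p + 1) ∈ p :: t'))) := by
        have : ((p + 1) ∈ h :: p :: t') ↔ ((p + 1) ∈ p :: t') := by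
          simp only [List.mem_cons]
          constructor
          · rintro (e | m)
            · omega
            · exact m
          · intro m; exact Or.inr m
        simp [this]
      have hends_congr : ∀ v ∈ p :: t', (!(decide ((v + 1) ∈ h :: p :: t'))) = (!(decide ((v + 1) ∈ p :: t'))) := by
        intro v hv
        rcases List.mem_cons.1 hv with e | hv
        · subst e; exact hpe
        · exact hgt' v hv
      -- starts of p::t' keep p; starts of h::p::t' keep h
      have hsp' : ¬ ((p - 1) ∈ p :: t') := by
        intro hm
        rcases List.mem_cons.1 hm with e | hm
        · omega
        · have := hpall _ hm; omega
      by_cases hc : p = h + 1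
      · -- h-1 absent, p-1 = h present: starts(u) = h :: starts(t'), ends(u) = ends(p::t')
        have hph : (p - 1) ∈ h :: p :: t' := by
          simp only [List.mem_cons]; left; omega
        have hhe : (h + 1) ∈ h :: p :: t' := by
          simp only [List.mem_cons]; right; left; omega
        have starts_u : (h :: p :: t').filter (fun v => !(decide ((v - 1) ∈ h :: p :: t')))
            = h :: t'.filter (fun v => !(decide ((v - 1) ∈ p :: t'))) := by
          rw [List.filter_cons_of_pos (by simp [hsh]),
            List.filter_cons_of_neg (by simp [hph]), List.filter_congr hft']
        have starts_v : (p :: t').filter (fun v => !(decide ((v - 1) ∈ p :: t')))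
            = p :: t'.filter (fun v => !(decide ((v - 1) ∈ p :: t'))) :=
          List.filter_cons_of_pos (by simp [hsp'])
        have ends_u : (h :: p :: t').filter (fun v => !(decide ((v + 1) ∈ h :: p :: t')))
            = (p :: t').filter (fun v => !(decide ((v + 1) ∈ p :: t'))) := by
          rw [List.filter_cons_of_neg (by simp [hhe])]
          show List.filter _ (p :: t') = _
          rw [List.filter_congr hends_congr]
        -- from bBuild_head + ihv: ends(p::t') is nonempty and the first run is a range from p
        obtain ⟨r, rs, hb⟩ := bBuild_head p t'
        rcases hE : (p :: t').filter (fun v => !(decide ((v + 1) ∈ p :: t'))) with _ | ⟨e1, ends''⟩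
        · exfalso
          have h2 := ihv
          rw [runsOf, starts_v, hE, hb] at h2
          simp at h2
        · have h2 := ihv
          rw [runsOf, starts_v, hE, hb] at h2
          simp only [List.zip_cons_cons, List.map_cons] at h2
          injection h2 with hfirst1 hfirst2
          have hple : p < e1 + 1 := by
            by_contra hle
            have hnil : PySem.List.pyRange p (e1 + 1) 1 = [] :=
              PySem.List.pyRange_one_eq_nil (by omega)
            rw [hfirst1] at hnil; exact (List.cons_ne_nil _ _) hnil
          rw [runsOf, starts_u, ends_u, hE]
          simp only [List.zip_cons_cons, List.map_cons]
          rw [bBuild_cons_eq h (p :: t') p r rs hb, if_pos hc, hfirst2]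
          have hcons : PySem.List.pyRange h (e1 + 1) 1 = h :: PySem.List.pyRange (h + 1) (e1 + 1) 1 :=
            PySem.List.pyRange_one_cons (by omega)
          rw [hcons, show h + 1 = p by omega, hfirst1]
      · -- p > h + 1: both h and its singleton run split off
        have hhe : ¬ ((h + 1) ∈ h :: p :: t') := by
          intro hm
          rcases List.mem_cons.1 hm with e | hm
          · omega
          · rcases List.mem_cons.1 hm with e | hm
            · omega
            · have := hpall _ hm; omega
        have hph : ¬ ((p - 1) ∈ h :: p :: t') := by
          intro hm
          rcases List.mem_cons.1 hm with e | hm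
          · omega
          · exact hsp' hm
        have starts_u : (h :: p :: t').filter (fun v => !(decide ((v - 1) ∈ h :: p :: t')))
            = h :: (p :: t').filter (fun v => !(decide ((v - 1) ∈ p :: t'))) := by
          rw [List.filter_cons_of_pos (by simp [hsh])]
          show (h :: List.filter _ (p :: t')) = _
          congr 1
          rw [List.filter_cons_of_pos (by simp [hph]), List.filter_congr hft',
            List.filter_cons_of_pos (by simp [hsp'])]
        have ends_u : (h :: p :: t').filter (fun v => !(decide ((v + 1) ∈ h :: p :: t')))
            = h :: (p :: t').filter (fun v => !(decide ((v + 1) ∈ p :: t'))) := by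
          rw [List.filter_cons_of_pos (by simp [hhe])]
          show (h :: List.filter _ (p :: t')) = _
          congr 1
          rw [List.filter_congr hends_congr]
        obtain ⟨r, rs, hb⟩ := bBuild_head p t'
        rw [runsOf, starts_u, ends_u]
        simp only [List.zip_cons_cons, List.map_cons]
        rw [bBuild_cons_eq h (p :: t') p r rs hb, if_neg hc]
        congr 1
        · exact PySem.List.pyRange_one_singleton h
        · rw [← runsOf, ihv, hb]

-- ===== assembling the two sides =====
theorem consecutive_runs_py_spec : Claim_equal_consecutive_runs_py := by
  intro positions _
  show consecutive_runs_py positions = consecutive_runs_py_alt positions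
  have hcont : ∀ x : Int, PySem.Set.contains (PySem.Set.ofList positions) x
      = decide (x ∈ PySem.List.sorted (PySem.Set.ofList positions) (fun x => x) false) := by
    intro x
    have hiff : PySem.Set.contains (PySem.Set.ofList positions) x = true
        ↔ x ∈ PySem.List.sorted (PySem.Set.ofList positions) (fun x => x) false :=
      (PySem.Set.contains_iff _ _).trans (PySem.List.mem_sorted _ _ _ _).symm
    by_cases hx : x ∈ PySem.List.sorted (PySem.Set.ofList positions) (fun x => x) false
    · simp only [hx, decide_true]
      exact hiff.2 hx
    · simp only [hx, decide_false]
      rw [← Bool.not_eq_true]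
      exact fun hct => hx (hiff.1 hct)
  have halt : consecutive_runs_py_alt positions
      = runsOf (PySem.List.sorted (PySem.Set.ofList positions) (fun x => x) false) := by
    unfold consecutive_runs_py_alt runsOf
    simp only [hcont]
  rw [halt, runsOf_eq_bBuild _ (PySem.List.sorted_ofList_pairwise_lt positions)]
  unfold consecutive_runs_py
  by_cases hp : positions = []
  · subst hp; rfl
  · simp only [if_neg hp]
    rcases hs : PySem.List.sorted (PySem.Set.ofList positions) (fun x => x) false with _ | ⟨h, t⟩
    · rw [PySem.List.sorted_eq_nil_iff] at hs
      rcases positions with _ | ⟨x, xs⟩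
      · exact absurd rfl hp
      · exfalso
        have : x ∈ PySem.Set.ofList (x :: xs) := by
          rw [PySem.Set.mem_ofList]; exact List.mem_cons_self
        rw [hs] at this; exact absurd this (List.not_mem_nil)
    · exact aLoop_eq_bBuild t h
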